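-- pv_equiv track=rewrite | github.com/kevinsu/aoc | 2023/day14/part2/main.py | get_map_tilted_north_facing_west
-- ===== SOURCE A (Python) =====
-- def get_map_tilted_north_facing_west(rock_map):
--   north_map = []
--   blocker = 0
--   for col in range(0, len(rock_map[0])):
--     column = []
--     rock_count = 0
--     blank_count = 0
--     for row in range(0, len(rock_map)):
--       if rock_map[row][col] == '#':
--         column.extend(['O']*rock_count)
--         column.extend(['.']*blank_count)
--         column.append('#')
--         rock_count = 0
--         blank_count = 0
--       elif rock_map[row][col] == 'O':
--         rock_count += 1
--       else:
--         blank_count += 1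
--     column.extend(['O']*rock_count)
--     column.extend(['.']*blank_count)
--     north_map.append(list(reversed(column)))
--   return north_map
-- ===== SOURCE B (Python) =====
-- def get_map_tilted_north_facing_west(rock_map):
--   north_map = []
--   for col in range(len(rock_map[0])):
--     norm = ''.join(
--       '#' if rock_map[row][col] == '#' else
--       'O' if rock_map[row][col] == 'O' else '.'
--       for row in range(len(rock_map)))
--     tilted = '#'.join(
--       'O' * seg.count('O') + '.' * (len(seg) - seg.count('O'))
--       for seg in norm.split('#'))
--     north_map.append(list(tilted[::-1]))
--   return north_map
-- ===== Notes on version B (the rewrite author's own statement) =====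
-- stated objective: idiomatic
-- what changed: Replaced A's inline rock/blank counter accumulator with a per-column pipeline: join the column into a string, split it on '#', sort each segment's rocks before blanks by counting, rejoin with '#' and reverse once.
import Mathlib
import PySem

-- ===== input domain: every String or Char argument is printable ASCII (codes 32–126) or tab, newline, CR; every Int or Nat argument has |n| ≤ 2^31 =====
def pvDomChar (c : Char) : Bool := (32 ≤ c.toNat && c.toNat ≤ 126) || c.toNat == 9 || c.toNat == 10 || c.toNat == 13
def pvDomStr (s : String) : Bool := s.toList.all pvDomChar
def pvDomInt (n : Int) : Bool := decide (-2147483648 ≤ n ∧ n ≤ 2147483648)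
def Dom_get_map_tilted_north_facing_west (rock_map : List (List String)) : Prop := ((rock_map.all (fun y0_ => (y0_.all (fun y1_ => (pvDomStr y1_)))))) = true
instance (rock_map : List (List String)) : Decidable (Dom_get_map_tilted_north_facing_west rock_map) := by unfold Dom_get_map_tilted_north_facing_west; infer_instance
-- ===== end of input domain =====

-- B replaces A's inline rock/blank counter accumulator with a per-column split-on-'#',
-- count-and-rebuild-each-segment, rejoin-and-reverse pipeline (same cost; more idiomatic).

-- ===== PORT A =====
def get_map_tilted_north_facing_west (rock_map : List (List String)) : List (List String) :=
  (PySem.List.pyRange 0 ((rock_map.headD []).length : Int) 1).foldl (fun north_map col =>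
    let st := (PySem.List.pyRange 0 (rock_map.length : Int) 1).foldl
      (fun (st : List String × Nat × Nat) row =>
        let cell := PySem.List.pyGetD (PySem.List.pyGetD rock_map row []) col ""
        if cell = "#" then
          (st.1 ++ List.replicate st.2.1 "O" ++ List.replicate st.2.2 "." ++ ["#"], 0, 0)
        else if cell = "O" then (st.1, st.2.1 + 1, st.2.2)
        else (st.1, st.2.1, st.2.2 + 1))
      ([], 0, 0)
    north_map ++ [(st.1 ++ List.replicate st.2.1 "O" ++ List.replicate st.2.2 ".").reverse])
    []

-- ===== PORT B =====
-- '#' if cell == '#' else 'O' if cell == 'O' else '.'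
def pvNormChar (cell : String) : Char :=
  if cell = "#" then '#' else if cell = "O" then 'O' else '.'

-- 'O' * seg.count('O') + '.' * (len(seg) - seg.count('O'))
def pvSegTilt (seg : List Char) : List Char :=
  List.replicate (PySem.Chars.count seg ['O']) 'O'
    ++ List.replicate (seg.length - PySem.Chars.count seg ['O']) '.'

def get_map_tilted_north_facing_west_alt (rock_map : List (List String)) : List (List String) :=
  (PySem.List.pyRange 0 ((rock_map.headD []).length : Int) 1).foldl (fun north_map col =>
    let norm : List Char := (PySem.List.pyRange 0 (rock_map.length : Int) 1).map
      (fun row => pvNormChar (PySem.List.pyGetD (PySem.List.pyGetD rock_map row []) col ""))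
    let tilted := PySem.Chars.join ['#'] ((PySem.Chars.splitOn norm ['#']).map pvSegTilt)
    north_map ++ [tilted.reverse.map (fun c => String.ofList [c])])
    []

-- ===== PRECONDITION & SPEC =====
-- Python A raises IndexError on an empty rock_map (rock_map[0]) and on ragged maps where some
-- row is shorter than row 0; exactly those inputs are excluded.
def Pre_get_map_tilted_north_facing_west (rock_map : List (List String)) : Prop :=
  rock_map ≠ [] ∧ ∀ r ∈ rock_map, (rock_map.headD []).length ≤ r.length
instance (rock_map : List (List String)) : Decidable (Pre_get_map_tilted_north_facing_west rock_map) := by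
  unfold Pre_get_map_tilted_north_facing_west; infer_instance
def pvWitness_get_map_tilted_north_facing_west : List (List String) :=
  [["O", "."], ["#", "O"]]

def Spec_get_map_tilted_north_facing_west (rock_map : List (List String)) (out : List (List String)) : Prop := out = get_map_tilted_north_facing_west_alt rock_map
instance (rock_map : List (List String)) (out : List (List String)) : Decidable (Spec_get_map_tilted_north_facing_west rock_map out) := by unfold Spec_get_map_tilted_north_facing_west; infer_instance

-- ===== CLAIM (what is proved, stated in full; the proofs are below) =====
def Claim_equal_get_map_tilted_north_facing_west : Prop := ∀ (rock_map : List (List String)), Dom_get_map_tilted_north_facing_west rock_map → Pre_get_map_tilted_north_facing_west rock_map → Spec_get_map_tilted_north_facing_west rock_map (get_map_tilted_north_facing_west rock_map)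

-- ===== LEMMAS AND PROOFS =====

-- common reference: the tilted column, built left-to-right with pending rock/blank counters
def pvTiltAux : List Char → Nat → Nat → List Char
  | [], r, b => List.replicate r 'O' ++ List.replicate b '.'
  | c :: cs, r, b =>
    if c = '#' then List.replicate r 'O' ++ List.replicate b '.' ++ '#' :: pvTiltAux cs 0 0
    else if c = 'O' then pvTiltAux cs (r + 1) b
    else pvTiltAux cs r (b + 1)

-- structural form of s.split('#') (cur = current piece, reversed)
def pvSplit : List Char → List Char → List (List Char)
  | cur, [] => [cur.reverse]
  | cur, c :: rest => if c = '#' then cur.reverse :: pvSplit [] rest else pvSplit (c :: cur) rest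

lemma pvSplit_ne_nil (cur cs : List Char) : pvSplit cur cs ≠ [] := by
  induction cs generalizing cur with
  | nil => simp [pvSplit]
  | cons c rest ih =>
    simp only [pvSplit]
    split_ifs
    · simp
    · exact ih _

lemma pvSplitOn_go_single (fuel : Nat) (l cur : List Char) (acc : List (List Char))
    (h : l.length ≤ fuel) :
    PySem.Chars.splitOn.go ['#'] fuel l cur acc = acc.reverse ++ pvSplit cur l := by
  induction fuel generalizing l cur acc with
  | zero =>
    interval_cases hl : l.length
    match l, hl with
    | [], _ => simp [PySem.Chars.splitOn.go, pvSplit]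
  | succ fuel ih =>
    match l with
    | [] => simp [PySem.Chars.splitOn.go, pvSplit]
    | c :: rest =>
      have hrest : rest.length ≤ fuel := by simp at h; omega
      by_cases hc : c = '#'
      · subst hc
        have hpre : (['#'].isPrefixOf ('#' :: rest)) = true := by
          simp [List.isPrefixOf]
        simp only [PySem.Chars.splitOn.go, hpre, if_true, List.length_cons, List.length_nil,
          List.drop_succ_cons, List.drop_zero]
        rw [ih rest [] (cur.reverse :: acc) hrest]
        simp [pvSplit]
      · have hpre : (['#'].isPrefixOf (c :: rest)) = false := by
          simp [List.isPrefixOf]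
          exact fun hx => absurd hx.symm hc
        simp only [PySem.Chars.splitOn.go, hpre, Bool.false_eq_true, if_false]
        rw [ih rest (c :: cur) acc hrest]
        simp [pvSplit, hc]

lemma pvSplitOn_single (l : List Char) :
    PySem.Chars.splitOn l ['#'] = pvSplit [] l := by
  unfold PySem.Chars.splitOn
  rw [pvSplitOn_go_single _ _ _ _ (by omega)]
  simp

lemma pvCount_go_single (fuel : Nat) (l : List Char) (acc : Nat) (h : l.length ≤ fuel) :
    PySem.Chars.count.go ['O'] fuel l acc = acc + l.count 'O' := by
  induction fuel generalizing l acc with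
  | zero =>
    interval_cases hl : l.length
    match l, hl with
    | [], _ => simp [PySem.Chars.count.go]
  | succ fuel ih =>
    match l with
    | [] => simp [PySem.Chars.count.go]
    | c :: rest =>
      have hrest : rest.length ≤ fuel := by simp at h; omega
      by_cases hc : c = 'O'
      · subst hc
        have hpre : (['O'].isPrefixOf ('O' :: rest)) = true := by
          simp [List.isPrefixOf]
        simp only [PySem.Chars.count.go, hpre, if_true, List.length_cons, List.length_nil,
          List.drop_succ_cons, List.drop_zero]
        rw [ih rest (acc + 1) hrest]
        simp
        omega
      · have hpre : (['O'].isPrefixOf (c :: rest)) = false := by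
          simp [List.isPrefixOf]
          exact fun hx => absurd hx.symm hc
        simp only [PySem.Chars.count.go, hpre, Bool.false_eq_true, if_false]
        rw [ih rest acc hrest]
        simp [hc]

lemma pvCount_single (l : List Char) : PySem.Chars.count l ['O'] = l.count 'O' := by
  unfold PySem.Chars.count
  rw [if_neg (by simp), pvCount_go_single _ _ _ (le_refl _)]
  simp

lemma pvSegTilt_counts (seg : List Char) :
    pvSegTilt seg = List.replicate (seg.count 'O') 'O'
      ++ List.replicate (seg.length - seg.count 'O') '.' := by
  simp [pvSegTilt, pvCount_single]

-- B's split/count/join pipeline computes pvTiltAux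
lemma pvJoin_split_eq_tiltAux (cs cur : List Char) :
    PySem.Chars.join ['#'] ((pvSplit cur cs).map pvSegTilt)
      = pvTiltAux cs (cur.count 'O') (cur.length - cur.count 'O') := by
  induction cs generalizing cur with
  | nil =>
    simp [pvSplit, PySem.Chars.join_singleton, pvSegTilt_counts, pvTiltAux, List.count_reverse]
  | cons c rest ih =>
    by_cases hc : c = '#'
    · subst hc
      simp only [pvSplit, pvTiltAux, List.map_cons, reduceIte]
      obtain ⟨p, ps, hps⟩ : ∃ p ps, pvSplit ([] : List Char) rest = p :: ps := by
        cases h : pvSplit ([] : List Char) rest with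
        | nil => exact absurd h (pvSplit_ne_nil _ _)
        | cons p ps => exact ⟨p, ps, rfl⟩
      rw [hps, List.map_cons, PySem.Chars.join_cons_cons, pvSegTilt_counts]
      have := ih ([] : List Char)
      rw [hps] at this
      simp only [List.count_nil, List.length_nil, Nat.sub_zero, List.map_cons] at this
      rw [this]
      simp [List.count_reverse]
    · have h2 : cur.count 'O' ≤ cur.length := List.count_le_length
      by_cases ho : c = 'O'
      · subst ho
        have hno : ¬ ('O' : Char) = '#' := by decide
        simp only [pvSplit, pvTiltAux]
        rw [if_neg hno, if_neg hno]
        simp only [if_true]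
        rw [ih ('O' :: cur)]
        have e1 : ('O' :: cur).count 'O' = cur.count 'O' + 1 := by simp
        rw [e1, List.length_cons, Nat.succ_sub_succ]
      · simp only [pvSplit, pvTiltAux, if_neg hc, if_neg ho]
        rw [ih (c :: cur)]
        have e1 : (c :: cur).count 'O' = cur.count 'O' := by
          simp [ho]
        rw [e1, List.length_cons]
        congr 1
        omega

-- A's counter loop over the cells of a column computes pvTiltAux (as singleton strings)
lemma pvLoopA (cells : List (List String)) (col : Int) (column : List String) (r b : Nat) :
    (cells.foldl
        (fun (st : List String × Nat × Nat) rw =>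
          let cell := PySem.List.pyGetD rw col ""
          if cell = "#" then
            (st.1 ++ List.replicate st.2.1 "O" ++ List.replicate st.2.2 "." ++ ["#"], 0, 0)
          else if cell = "O" then (st.1, st.2.1 + 1, st.2.2)
          else (st.1, st.2.1, st.2.2 + 1))
        (column, r, b)).1
      ++ List.replicate (cells.foldl
        (fun (st : List String × Nat × Nat) rw =>
          let cell := PySem.List.pyGetD rw col ""
          if cell = "#" then
            (st.1 ++ List.replicate st.2.1 "O" ++ List.replicate st.2.2 "." ++ ["#"], 0, 0)
          else if cell = "O" then (st.1, st.2.1 + 1, st.2.2)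
          else (st.1, st.2.1, st.2.2 + 1))
        (column, r, b)).2.1 "O"
      ++ List.replicate (cells.foldl
        (fun (st : List String × Nat × Nat) rw =>
          let cell := PySem.List.pyGetD rw col ""
          if cell = "#" then
            (st.1 ++ List.replicate st.2.1 "O" ++ List.replicate st.2.2 "." ++ ["#"], 0, 0)
          else if cell = "O" then (st.1, st.2.1 + 1, st.2.2)
          else (st.1, st.2.1, st.2.2 + 1))
        (column, r, b)).2.2 "."
      = column ++ (pvTiltAux (cells.map fun rw => pvNormChar (PySem.List.pyGetD rw col "")) r b).map
          (fun c => String.ofList [c]) := by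
  induction cells generalizing column r b with
  | nil => simp [pvTiltAux]
  | cons rw rest ih =>
    simp only [List.foldl_cons, List.map_cons]
    by_cases h1 : PySem.List.pyGetD rw col "" = "#"
    · rw [if_pos h1, ih]
      simp [pvNormChar, h1, pvTiltAux, List.map_replicate]
    · by_cases h2 : PySem.List.pyGetD rw col "" = "O"
      · rw [if_neg h1, if_pos h2, ih]
        simp [pvNormChar, h2, pvTiltAux]
      · rw [if_neg h1, if_neg h2, ih]
        simp [pvNormChar, h1, h2, pvTiltAux]

-- per-column equality of the two ports' bodies
lemma pvColumn_eq (rock_map : List (List String)) (col : Int) :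
    ((((PySem.List.pyRange 0 (rock_map.length : Int) 1).foldl
        (fun (st : List String × Nat × Nat) row =>
          let cell := PySem.List.pyGetD (PySem.List.pyGetD rock_map row []) col ""
          if cell = "#" then
            (st.1 ++ List.replicate st.2.1 "O" ++ List.replicate st.2.2 "." ++ ["#"], 0, 0)
          else if cell = "O" then (st.1, st.2.1 + 1, st.2.2)
          else (st.1, st.2.1, st.2.2 + 1))
        ([], 0, 0)).1
      ++ List.replicate ((PySem.List.pyRange 0 (rock_map.length : Int) 1).foldl
        (fun (st : List String × Nat × Nat) row =>
          let cell := PySem.List.pyGetD (PySem.List.pyGetD rock_map row []) col ""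
          if cell = "#" then
            (st.1 ++ List.replicate st.2.1 "O" ++ List.replicate st.2.2 "." ++ ["#"], 0, 0)
          else if cell = "O" then (st.1, st.2.1 + 1, st.2.2)
          else (st.1, st.2.1, st.2.2 + 1))
        ([], 0, 0)).2.1 "O")
      ++ List.replicate ((PySem.List.pyRange 0 (rock_map.length : Int) 1).foldl
        (fun (st : List String × Nat × Nat) row =>
          let cell := PySem.List.pyGetD (PySem.List.pyGetD rock_map row []) col ""
          if cell = "#" then
            (st.1 ++ List.replicate st.2.1 "O" ++ List.replicate st.2.2 "." ++ ["#"], 0, 0)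
          else if cell = "O" then (st.1, st.2.1 + 1, st.2.2)
          else (st.1, st.2.1, st.2.2 + 1))
        ([], 0, 0)).2.2 ".").reverse
      = (PySem.Chars.join ['#']
          (((PySem.Chars.splitOn ((PySem.List.pyRange 0 (rock_map.length : Int) 1).map
              (fun row => pvNormChar (PySem.List.pyGetD (PySem.List.pyGetD rock_map row []) col "")))
            ['#'])).map pvSegTilt)).reverse.map (fun c => String.ofList [c]) := by
  rw [PySem.List.foldl_pyRange_zero_pyGetD' rock_map ([] : List String)
      (fun (st : List String × Nat × Nat) rw =>
        let cell := PySem.List.pyGetD rw col ""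
        if cell = "#" then
          (st.1 ++ List.replicate st.2.1 "O" ++ List.replicate st.2.2 "." ++ ["#"], 0, 0)
        else if cell = "O" then (st.1, st.2.1 + 1, st.2.2)
        else (st.1, st.2.1, st.2.2 + 1)) (([], 0, 0) : List String × Nat × Nat)]
  have hmap : (PySem.List.pyRange 0 (rock_map.length : Int) 1).map
      (fun row => pvNormChar (PySem.List.pyGetD (PySem.List.pyGetD rock_map row []) col ""))
      = rock_map.map (fun rw => pvNormChar (PySem.List.pyGetD rw col "")) := by
    conv_rhs => rw [← PySem.List.map_pyGetD_pyRange_zero' rock_map ([] : List String)]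
    rw [List.map_map]
    rfl
  rw [hmap, pvLoopA rock_map col [] 0 0, pvSplitOn_single, pvJoin_split_eq_tiltAux]
  simp [List.map_reverse]

-- ===== VERDICT (by name: the statement is the Claim_ definition above) =====
theorem get_map_tilted_north_facing_west_spec : Claim_equal_get_map_tilted_north_facing_west := by
  intro rock_map _ _
  unfold Spec_get_map_tilted_north_facing_west
  unfold get_map_tilted_north_facing_west get_map_tilted_north_facing_west_alt
  simp only []
  rw [PySem.List.foldl_append_singleton_eq_map, PySem.List.foldl_append_singleton_eq_map]
  simp only [List.nil_append]
  apply List.map_congr_left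
  intro col _
  exact pvColumn_eq rock_map col
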